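-- pv_equiv track=rewrite | github.com/pypi-data/pypi-mirror-99 | packages/iehf/iehf-0.0.1.tar.gz/iehf-0.0.1/iehf/src/iehf.py | add_br_to_title
-- ===== SOURCE A (Python) =====
-- def add_br_to_title(x, n = 2):
--     words = x.split()
--
--     out = ''
--     for idx, w in enumerate(words):
--         if idx > 0 and idx % 2 == 1:
--             out += f'{w}<br>'
--         else:
--             out += f'{w} '
--     out = ''.join(out).strip()
--     return out
-- ===== SOURCE B (Python) =====
-- def add_br_to_title(x, n = 2):
--     # n is accepted (as in the original) but unused
--     def pairs(ws):
--         if len(ws) == 0: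
--             return ''
--         if len(ws) == 1:
--             return ws[0]
--         return ws[0] + ' ' + ws[1] + '<br>' + pairs(ws[2:])
--     return pairs(x.split())
-- ===== Notes on version B (the rewrite author's own statement) =====
-- stated objective: simpler
-- what changed: Replaced the indexed loop with a per-word parity conditional plus a final strip by a direct recursion over consecutive word pairs (each pair joined by a space, pairs separated/terminated by the break tag, a trailing lone word kept plain), needing no enumerate, no parity test and no strip.
import Mathlib
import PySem

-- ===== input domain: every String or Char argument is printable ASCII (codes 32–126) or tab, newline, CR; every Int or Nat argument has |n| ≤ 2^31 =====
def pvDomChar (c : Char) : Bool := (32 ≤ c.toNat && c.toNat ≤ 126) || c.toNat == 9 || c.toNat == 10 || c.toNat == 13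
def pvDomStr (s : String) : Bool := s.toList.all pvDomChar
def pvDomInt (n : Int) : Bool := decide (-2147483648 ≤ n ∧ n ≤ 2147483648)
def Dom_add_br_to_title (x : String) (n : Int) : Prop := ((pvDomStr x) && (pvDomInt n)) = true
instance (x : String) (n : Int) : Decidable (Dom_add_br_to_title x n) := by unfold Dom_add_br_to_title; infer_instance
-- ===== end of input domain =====

-- B replaces A's enumerate-with-parity loop + final strip by a direct recursion over
-- consecutive word pairs (simpler decomposition); both are total, equivalence on all inputs.

-- ===== PORT A =====
def add_br_to_title (x : String) (n : Int) : String :=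
  let words := PySem.Str.split₀ x
  let out := (PySem.List.enumerate words).foldl
    (fun out p => if p.1 > 0 && p.1 % 2 == 1 then out ++ p.2 ++ "<br>" else out ++ p.2 ++ " ")
    ""
  -- ''.join(out) applied to a str is the identity, so only the .strip() remains
  PySem.Str.strip out

-- ===== PORT B =====
def pairsB : List String → String
  | [] => ""
  | [w] => w
  | w1 :: w2 :: rest => w1 ++ " " ++ w2 ++ "<br>" ++ pairsB rest

def add_br_to_title_alt (x : String) (n : Int) : String :=
  pairsB (PySem.Str.split₀ x)

-- ===== PRECONDITION & SPEC =====
def Spec_add_br_to_title (x : String) (n : Int) (out : String) : Prop := out = add_br_to_title_alt x n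
instance (x : String) (n : Int) (out : String) : Decidable (Spec_add_br_to_title x n out) := by unfold Spec_add_br_to_title; infer_instance

-- ===== CLAIM (what is proved, stated in full; the proofs are below) =====
def Claim_equal_add_br_to_title : Prop := ∀ (x : String) (n : Int), Dom_add_br_to_title x n → Spec_add_br_to_title x n (add_br_to_title x n)

-- ===== LEMMAS AND PROOFS =====

-- char-list version of B's pair recursion
def pairsBC : List (List Char) → List Char
  | [] => []
  | [w] => w
  | w1 :: w2 :: rest => w1 ++ [' '] ++ w2 ++ ['<','b','r','>'] ++ pairsBC rest

-- char-list version of what A's loop produces before the strip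
def pairsSpC : List (List Char) → List Char
  | [] => []
  | [w] => w ++ [' ']
  | w1 :: w2 :: rest => w1 ++ [' '] ++ w2 ++ ['<','b','r','>'] ++ pairsSpC rest

-- every word produced by str.split() is nonempty and contains no whitespace
def GoodWords (ws : List (List Char)) : Prop :=
  ∀ w ∈ ws, w ≠ [] ∧ ∀ c ∈ w, PySem.Chars.isspace c = false

lemma split₀_go_good : ∀ (s cur : List Char) (acc : List (List Char)),
    GoodWords acc →
    (∀ c ∈ cur, PySem.Chars.isspace c = false) →
    GoodWords (PySem.Chars.split₀.go s cur acc) := by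
  intro s
  induction s with
  | nil =>
      intro cur acc hacc hcur
      simp only [PySem.Chars.split₀.go]
      split
      · intro w hw; exact hacc w (by simpa using hw)
      · next h =>
          intro w hw
          simp only [List.reverse_cons] at hw
          rcases (by simpa using hw : w ∈ acc ∨ w = cur.reverse) with h2 | h1
          · exact hacc w h2
          · subst h1
            constructor
            · simpa [List.isEmpty_iff] using h
            · intro c hc; exact hcur c (List.mem_reverse.mp hc)
  | cons c rest ih =>
      intro cur acc hacc hcur
      simp only [PySem.Chars.split₀.go]
      split
      · split
        · exact ih [] acc hacc (by simp)
        · next h =>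
            refine ih [] _ ?_ (by simp)
            intro w hw
            rcases List.mem_cons.mp hw with h1 | h2
            · subst h1
              exact ⟨by simpa [List.isEmpty_iff] using h,
                     fun d hd => hcur d (List.mem_reverse.mp hd)⟩
            · exact hacc w h2
      · next h =>
          refine ih (c :: cur) acc hacc ?_
          intro d hd
          rcases List.mem_cons.mp hd with h1 | h2
          · subst h1; simpa using h
          · exact hcur d h2

lemma split₀_good (s : List Char) : GoodWords (PySem.Chars.split₀ s) :=
  split₀_go_good s [] [] (by intro w hw; simp at hw) (by simp)

lemma pairsB_toList (ws : List (List Char)) :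
    (pairsB (ws.map String.ofList)).toList = pairsBC ws := by
  induction ws using pairsBC.induct <;>
    simp [pairsB, pairsBC, *]

lemma pairsSp_decomp (ws : List (List Char)) :
    pairsSpC ws = pairsBC ws ++ (if ws.length % 2 = 1 then [' '] else []) := by
  induction ws using pairsBC.induct with
  | case1 => simp [pairsSpC, pairsBC]
  | case2 w => simp [pairsSpC, pairsBC]
  | case3 w1 w2 rest ih =>
      have h : (rest.length + 1 + 1) % 2 = rest.length % 2 := by omega
      simp only [pairsSpC, pairsBC, List.length_cons, ih, h, List.append_assoc]

lemma foldA_eq (ws : List String) : ∀ (k : Int) (acc : String), 0 ≤ k → k % 2 = 0 →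
    (PySem.List.enumerate ws k).foldl
      (fun out p => if p.1 > 0 && p.1 % 2 == 1 then out ++ p.2 ++ "<br>" else out ++ p.2 ++ " ")
      acc
    = acc ++ String.ofList (pairsSpC (ws.map String.toList)) := by
  induction ws using pairsB.induct with
  | case1 => intro k acc _ _; simp [PySem.List.enumerate, pairsSpC]
  | case2 w =>
      intro k acc h0 h2
      simp only [PySem.List.enumerate, List.foldl]
      split
      next h => simp only [Bool.and_eq_true, decide_eq_true_eq, beq_iff_eq] at h; omega
      next _ => simp [pairsSpC, String.ext_iff]
  | case3 w1 w2 rest ih =>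
      intro k acc h0 h2
      simp only [PySem.List.enumerate, List.foldl]
      rw [show ((decide (k > 0) && (k % 2 == 1))) = false by
            simp only [Bool.and_eq_false_iff, decide_eq_false_iff_not, beq_eq_false_iff_ne]
            omega,
          show ((decide (k + 1 > 0) && ((k + 1) % 2 == 1))) = true by
            simp only [Bool.and_eq_true, decide_eq_true_eq, beq_iff_eq]
            omega]
      simp only [if_true, if_false, Bool.false_eq_true]
      rw [ih (k+1+1) _ (by omega) (by omega)]
      simp [pairsSpC, String.ext_iff]

lemma rstrip_append_space (l : List Char) :
    PySem.Chars.rstrip (l ++ [' ']) = PySem.Chars.rstrip l := by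
  simp [PySem.Chars.rstrip, show PySem.Chars.isspace ' ' = true by decide]

lemma rstrip_last (l : List Char) (c : Char) (h : PySem.Chars.isspace c = false) :
    PySem.Chars.rstrip (l ++ [c]) = l ++ [c] := by
  simp [PySem.Chars.rstrip, h]

lemma lstrip_cons (c : Char) (l : List Char) (h : PySem.Chars.isspace c = false) :
    PySem.Chars.lstrip (c :: l) = c :: l := by
  simp [PySem.Chars.lstrip, h]

lemma pairsBC_last (ws : List (List Char)) (hg : GoodWords ws) (hne : ws ≠ []) :
    ∃ l c, pairsBC ws = l ++ [c] ∧ PySem.Chars.isspace c = false := by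
  induction ws using pairsBC.induct with
  | case1 => exact absurd rfl hne
  | case2 w =>
      obtain ⟨hw, hall⟩ := hg w (by simp)
      refine ⟨w.dropLast, w.getLast hw, ?_, hall _ (List.getLast_mem hw)⟩
      simp [pairsBC, List.dropLast_append_getLast hw]
  | case3 w1 w2 rest ih =>
      rcases List.eq_nil_or_concat rest with hr | _
      · subst hr
        exact ⟨w1 ++ [' '] ++ w2 ++ ['<','b','r'], '>', by simp [pairsBC], by decide⟩
      · have hgr : GoodWords rest := fun w hw => hg w (by simp [hw])
        have hrne : rest ≠ [] := by rintro rfl; simp_all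
        obtain ⟨l, c, hlc, hc⟩ := ih hgr hrne
        exact ⟨w1 ++ [' '] ++ w2 ++ ['<','b','r','>'] ++ l, c, by simp [pairsBC, hlc], hc⟩

lemma pairsBC_head (ws : List (List Char)) (hg : GoodWords ws) (hne : ws ≠ []) :
    ∃ c t, pairsBC ws = c :: t ∧ PySem.Chars.isspace c = false := by
  obtain ⟨w, rest, rfl⟩ := List.exists_cons_of_ne_nil hne
  obtain ⟨hw, hall⟩ := hg w (by simp)
  obtain ⟨c, t, rfl⟩ := List.exists_cons_of_ne_nil hw
  have htl : ∃ u, pairsBC ((c :: t) :: rest) = c :: t ++ u := by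
    cases rest <;> simp [pairsBC]
  obtain ⟨u, hu⟩ := htl
  exact ⟨c, t ++ u, by simpa using hu, hall c (by simp)⟩

lemma strip_pairsSp (ws : List (List Char)) (h : GoodWords ws) :
    PySem.Chars.strip (pairsSpC ws) = pairsBC ws := by
  rcases List.eq_nil_or_concat ws with rfl | _
  · simp [pairsSpC, pairsBC, PySem.Chars.strip, PySem.Chars.lstrip, PySem.Chars.rstrip]
  · have hne : ws ≠ [] := by rintro rfl; simp_all
    obtain ⟨c, t, hct, hc⟩ := pairsBC_head ws h hne
    obtain ⟨l, d, hld, hd⟩ := pairsBC_last ws h hne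
    rw [PySem.Chars.strip, pairsSp_decomp ws]
    split
    · rw [hct, List.cons_append, lstrip_cons _ _ hc, ← List.cons_append, ← hct,
          rstrip_append_space, hld, rstrip_last _ _ hd]
    · rw [List.append_nil, hct, lstrip_cons _ _ hc, ← hct, hld, rstrip_last _ _ hd]

-- ===== VERDICT (by name: the statement is the Claim_ definition above) =====
theorem add_br_to_title_spec : Claim_equal_add_br_to_title := by
  intro x n _
  simp only [Spec_add_br_to_title, add_br_to_title, add_br_to_title_alt]
  rw [foldA_eq _ 0 "" (by norm_num) (by norm_num)]
  have hwords : (PySem.Str.split₀ x) = (PySem.Chars.split₀ x.toList).map String.ofList := rfl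
  rw [hwords]
  have hmap : ((PySem.Chars.split₀ x.toList).map String.ofList).map String.toList
      = PySem.Chars.split₀ x.toList := by
    simp only [List.map_map]
    exact (List.map_congr_left (fun a _ => by simp)).trans (List.map_id _)
  rw [hmap]
  apply String.ext_iff.mpr
  simp only [PySem.Str.strip, String.toList_append, String.toList_ofList, pairsB_toList]
  simp [strip_pairsSp _ (split₀_good x.toList)]
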